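-- pv_equiv track=rewrite | github.com/Gabriel-Bastos-Rabelo/marathon-training | course/inclusion-exclusion-principle/Thenumberofintegersinagivenintervalwhicharemultipleofatleastoneofthegivennumbers.py | solve
-- ===== SOURCE A (Python) =====
-- import math
--
-- def solve(a, r):
--     soma = 0
--     for i in range(1, 1<<len(a)):
--         cont = 0
--         res = 1
--
--         for j in range(len(a)):
--             if(i >> j & 1):
--                 cont += 1
--                 res = math.lcm(res, a[j])
--
--         res = r//res
--         if cont % 2 == 0:
--             soma -= res
--
--         else:
--             soma += res
--
--     return soma
-- ===== SOURCE B (Python) =====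
-- import math
--
-- def solve(a, r):
--     # Recursive inclusion-exclusion: each recursive call extends the running
--     # lcm by one element instead of recomputing each subset's lcm from scratch.
--     def h(i, L):
--         if i == len(a):
--             return 0
--         L2 = math.lcm(L, a[i])
--         return r // L2 - h(i + 1, L2) + h(i + 1, L)
--     return h(0, 1)
-- ===== Notes on version B (the rewrite author's own statement) =====
-- stated objective: alternative
-- what changed: Replaced the bitmask enumeration that recomputes each subset's lcm from scratch (inner loop over all n positions per mask) with a branching recursion over the list that extends a running lcm accumulator by one element per call, removing the per-subset O(n) rescan (both remain exponential in n overall).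
import Mathlib
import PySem

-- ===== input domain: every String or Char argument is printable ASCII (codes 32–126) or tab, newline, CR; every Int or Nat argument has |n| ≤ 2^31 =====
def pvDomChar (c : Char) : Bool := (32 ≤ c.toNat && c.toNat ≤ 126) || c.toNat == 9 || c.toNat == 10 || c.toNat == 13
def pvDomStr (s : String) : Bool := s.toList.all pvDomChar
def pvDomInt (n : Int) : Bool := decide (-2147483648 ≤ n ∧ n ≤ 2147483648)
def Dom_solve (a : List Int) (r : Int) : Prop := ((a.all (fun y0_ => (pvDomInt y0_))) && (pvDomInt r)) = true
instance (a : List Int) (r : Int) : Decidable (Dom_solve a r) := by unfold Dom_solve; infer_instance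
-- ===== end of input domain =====

-- B replaces A's bitmask enumeration (which recomputes each subset's lcm from scratch)
-- with a branching recursion that extends a running lcm accumulator one element per call.


-- ===== PORT A =====
-- math.lcm(x, y): nonnegative lcm of |x| and |y| (exact for Python's math.lcm on two ints)
def pyLcm (x y : Int) : Int := (Int.lcm x y : Int)

-- the inner 'for j in range(len(a)): if i >> j & 1: …' loop: bit j of i selects a[j];
-- transcribed by walking the list while halving the mask (reads exactly bits 0,1,… of i)
def innerA (a : List Int) (i : Nat) (cont : Int) (res : Int) : Int × Int :=
  match a with
  | [] => (cont, res)
  | x :: rest =>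
      if i % 2 = 1 then innerA rest (i / 2) (cont + 1) (pyLcm res x)
      else innerA rest (i / 2) cont res

-- for i in range(1, 1 << len(a)): … (range(1, M) = List.range' 1 (M-1))
def solve (a : List Int) (r : Int) : Int :=
  (List.range' 1 (2 ^ a.length - 1)).foldl
    (fun soma i =>
      let p := innerA a i 0 1
      let res := PySem.Int.floordiv r p.2
      if p.1 % 2 = 0 then soma - res else soma + res)
    0

-- ===== PORT B =====
-- h(i, L) of Source B, structurally recursive on the remaining list
def hAux (a : List Int) (L : Int) (r : Int) : Int :=
  match a with
  | [] => 0
  | x :: rest =>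
      let L2 := pyLcm L x
      PySem.Int.floordiv r L2 - hAux rest L2 r + hAux rest L r

def solve_alt (a : List Int) (r : Int) : Int := hAux a 1 r

-- ===== PRECONDITION & SPEC =====
-- Pre_ excludes lists containing 0: there Python's A hits r // math.lcm(…, 0) = r // 0 and
-- raises ZeroDivisionError (B raises the same way).
def Pre_solve (a : List Int) (r : Int) : Prop := (0 : Int) ∉ a
instance (a : List Int) (r : Int) : Decidable (Pre_solve a r) := by unfold Pre_solve; infer_instance
def pvWitness_solve : List Int × Int := ([2, 3, 4], 20)

def Spec_solve (a : List Int) (r : Int) (out : Int) : Prop := out = solve_alt a r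
instance (a : List Int) (r : Int) (out : Int) : Decidable (Spec_solve a r out) := by unfold Spec_solve; infer_instance

-- ===== CLAIM (what is proved, stated in full; the proofs are below) =====
def Claim_equal_solve : Prop := ∀ (a : List Int) (r : Int), Dom_solve a r → Pre_solve a r → Spec_solve a r (solve a r)

-- ===== LEMMAS AND PROOFS =====

-- the per-mask summand of A
def gA (a : List Int) (L r : Int) (i : Nat) : Int :=
  let p := innerA a i 0 L
  if p.1 % 2 = 0 then -(PySem.Int.floordiv r p.2) else PySem.Int.floordiv r p.2

theorem innerA_zero (a : List Int) (c L : Int) : innerA a 0 c L = (c, L) := by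
  induction a with
  | nil => rfl
  | cons x rest ih => simp [innerA, ih]

-- cont is an accumulator: starting count shifts the first component, second is unchanged
theorem innerA_shift (a : List Int) (i : Nat) (c L : Int) :
    innerA a i c L = (c + (innerA a i 0 L).1, (innerA a i 0 L).2) := by
  induction a generalizing i c L with
  | nil => simp [innerA]
  | cons x rest ih =>
      simp only [innerA]
      split
      · rw [ih (i/2) (c+1), ih (i/2) (0+1)]
        simp only [Prod.mk.injEq]
        refine ⟨by ring, ?_⟩
        trivial
      · rw [ih (i/2) c]

-- the fold of A is its start plus the sum of the summands
theorem foldl_body_eq_sum (l : List Nat) (a : List Int) (L r s : Int) :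
    l.foldl (fun soma i =>
      let p := innerA a i 0 L
      let res := PySem.Int.floordiv r p.2
      if p.1 % 2 = 0 then soma - res else soma + res) s
    = s + (l.map (gA a L r)).sum := by
  induction l generalizing s with
  | nil => simp
  | cons i t ih =>
      simp only [List.foldl_cons, List.map_cons, List.sum_cons, ih, gA]
      split <;> ring

-- full-range sum (mask 0 included)
def TA (a : List Int) (L r : Int) : Int := ((List.range (2 ^ a.length)).map (gA a L r)).sum

theorem gA_even (x : Int) (rest : List Int) (L r : Int) (k : Nat) :
    gA (x :: rest) L r (2 * k) = gA rest L r k := by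
  simp only [gA, innerA]
  have h1 : (2 * k) % 2 = 0 := by omega
  have h2 : (2 * k) / 2 = k := by omega
  simp [h1, h2]

theorem gA_odd (x : Int) (rest : List Int) (L r : Int) (k : Nat) :
    gA (x :: rest) L r (2 * k + 1) = - gA rest (pyLcm L x) r k := by
  have h1 : (2 * k + 1) % 2 = 1 := by omega
  have h2 : (2 * k + 1) / 2 = k := by omega
  simp only [gA, innerA, h1, h2, zero_add, reduceIte]
  rw [innerA_shift rest k 1 (pyLcm L x)]
  set p := innerA rest k 0 (pyLcm L x)
  by_cases h : p.1 % 2 = 0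
  · have h' : ¬ (1 + p.1) % 2 = 0 := by omega
    rw [if_neg h', if_pos h, neg_neg]
  · have h' : (1 + p.1) % 2 = 0 := by omega
    rw [if_pos h', if_neg h]

-- pairing: a sum over range (2*m) groups into even/odd pairs
theorem sum_range_double (f : Nat → Int) (m : Nat) :
    ((List.range (2 * m)).map f).sum
      = ((List.range m).map (fun k => f (2 * k) + f (2 * k + 1))).sum := by
  induction m with
  | zero => simp
  | succ m ih =>
      have h : 2 * (m + 1) = (2 * m) + 1 + 1 := by omega
      rw [h, List.range_succ, List.range_succ, List.range_succ]
      simp only [List.map_append, List.sum_append, List.map_cons, List.map_nil,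
        List.sum_cons, List.sum_nil, ih]
      ring

theorem TA_eq (a : List Int) (L r : Int) :
    TA a L r = hAux a L r - PySem.Int.floordiv r L := by
  induction a generalizing L with
  | nil =>
      simp [TA, gA, innerA_zero, hAux]
  | cons x rest ih =>
      have hlen : 2 ^ (x :: rest).length = 2 * 2 ^ rest.length := by
        simp [List.length_cons, pow_succ]; ring
      rw [TA, hlen, sum_range_double]
      have : ((List.range (2 ^ rest.length)).map
          (fun k => gA (x :: rest) L r (2 * k) + gA (x :: rest) L r (2 * k + 1))).sum
          = ((List.range (2 ^ rest.length)).map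
          (fun k => gA rest L r k + - gA rest (pyLcm L x) r k)).sum := by
        apply congrArg
        apply List.map_congr_left
        intro k _
        rw [gA_even, gA_odd]
      rw [this]
      have hsplit : ((List.range (2 ^ rest.length)).map
          (fun k => gA rest L r k + - gA rest (pyLcm L x) r k)).sum
          = TA rest L r - TA rest (pyLcm L x) r := by
        simp only [TA]
        induction (List.range (2 ^ rest.length)) with
        | nil => simp
        | cons h t iht => simp only [List.map_cons, List.sum_cons, iht]; ring
      rw [hsplit, ih L, ih (pyLcm L x)]
      simp only [hAux]
      ring

theorem range_split (n : Nat) :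
    List.range (2 ^ n) = 0 :: List.range' 1 (2 ^ n - 1) := by
  obtain ⟨m, hm⟩ : ∃ m, 2 ^ n = m + 1 :=
    ⟨2 ^ n - 1, by have := Nat.one_le_two_pow (n := n); omega⟩
  rw [List.range_eq_range', hm, Nat.add_sub_cancel, List.range'_succ]

-- ===== VERDICT (by name: the statement is the Claim_ definition above) =====
theorem solve_spec : Claim_equal_solve := by
  intro a r _ _
  unfold Spec_solve solve solve_alt
  rw [foldl_body_eq_sum]
  have h := TA_eq a 1 r
  rw [TA, range_split] at h
  simp only [List.map_cons, List.sum_cons] at h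
  have hg0 : gA a 1 r 0 = -(PySem.Int.floordiv r 1) := by
    simp [gA, innerA_zero]
  rw [hg0] at h
  omega
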